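-- pv_equiv track=rewrite | github.com/seyko1/crypto-exercises-py | 1-historical-basic-cryptography/functions.py | get_prob_deciphers
-- ===== SOURCE A (Python) =====
-- def chiffre_vigenere(msg, key):
--   cipher = [ ((ord(msg[i]) - ord('A')) + (ord(key[i % len(key)]) - ord('A'))) % 26 + ord('A') for i in range(len(msg)) ]
--   cipher = "".join([chr(n) for n in cipher])
--
--   return cipher
--
-- def dechiffre_vigenere(cipher, key):
--   inv_key = [ (26 - (ord(key[i]) - ord('A'))) + ord('A') for i in range(len(key))]
--   inv_key = "".join([chr(n) for n in inv_key])
--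
--   msg = chiffre_vigenere(cipher, inv_key)
--   return msg
--
-- def get_prob_deciphers(cipher, key, prefix = '', deciphers = None):
--   # Déclarer l'argument par défaut deciphers avec None et non {} car un dictionnaire est immuable !
--   # Sinon une nouvelle liste est créée une fois lorsque la fonction est définie,
--   # et la même liste est utilisée à chaque appel successif dans le programme.
--   # cf: https://docs.python-guide.org/writing/gotchas/
--   if deciphers == None: deciphers = {}
--
--   if len(key) == 0:
--     deciphers[prefix] = dechiffre_vigenere(cipher, prefix)
--     return deciphers
--
--   first = key[0]
--
--   for c in first:
--     # Appel récursif en retirant l'élement du tableau stocké dans first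
--     get_prob_deciphers(cipher, key[1:], prefix + c, deciphers)
--   return deciphers
-- ===== SOURCE B (Python) =====
-- def chiffre_vigenere(msg, key):
--   cipher = [ ((ord(msg[i]) - ord('A')) + (ord(key[i % len(key)]) - ord('A'))) % 26 + ord('A') for i in range(len(msg)) ]
--   cipher = "".join([chr(n) for n in cipher])
--
--   return cipher
--
-- def dechiffre_vigenere(cipher, key):
--   inv_key = [ (26 - (ord(key[i]) - ord('A'))) + ord('A') for i in range(len(key))]
--   inv_key = "".join([chr(n) for n in inv_key])
--
--   msg = chiffre_vigenere(cipher, inv_key)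
--   return msg
--
-- def get_prob_deciphers(cipher, key, prefix = '', deciphers = None):
--   if deciphers is None: deciphers = {}
--   # Iterative breadth-first enumeration of the Cartesian product of the
--   # per-position alternatives, then one pass deciphering each full key.
--   full_keys = [prefix]
--   for position in key:
--     full_keys = [fk + c for fk in full_keys for c in position]
--   for fk in full_keys:
--     deciphers[fk] = dechiffre_vigenere(cipher, fk)
--   return deciphers
-- ===== Notes on version B (the rewrite author's own statement) =====
-- stated objective: idiomatic
-- what changed: Replaces A's recursive per-position branching (DFS with an accumulator dict mutated across recursive calls) by an iterative enumeration: one fold builds the list of all full keys (Cartesian product of the per-position alternatives), then a single pass deciphers each and fills the dict.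
import Mathlib
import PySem

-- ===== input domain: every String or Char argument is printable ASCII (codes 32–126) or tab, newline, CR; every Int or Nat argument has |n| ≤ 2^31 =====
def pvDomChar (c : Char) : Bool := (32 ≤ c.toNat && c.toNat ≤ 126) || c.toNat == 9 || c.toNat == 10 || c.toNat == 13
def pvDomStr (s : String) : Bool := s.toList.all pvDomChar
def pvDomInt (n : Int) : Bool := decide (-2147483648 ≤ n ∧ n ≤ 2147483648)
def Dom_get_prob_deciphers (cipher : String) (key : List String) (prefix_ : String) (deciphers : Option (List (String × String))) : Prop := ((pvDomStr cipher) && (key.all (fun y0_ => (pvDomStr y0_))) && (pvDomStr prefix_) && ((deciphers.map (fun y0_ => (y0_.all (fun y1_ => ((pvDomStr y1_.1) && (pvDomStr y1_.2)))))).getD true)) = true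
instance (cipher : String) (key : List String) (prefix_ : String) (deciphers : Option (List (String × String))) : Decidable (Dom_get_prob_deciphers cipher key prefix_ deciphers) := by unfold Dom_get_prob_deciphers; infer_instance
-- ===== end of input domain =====

-- B replaces A's recursive per-position branching by an iterative product enumeration
-- (build the list of full keys with one fold, then decipher each); objective: idiomatic/simpler.
-- Note: A mutates a passed-in `deciphers` dict in place; B performs the same mutation —
-- the equivalence proved here is about the RETURN value.

-- ===== PORT A =====
-- chiffre_vigenere(msg, key); the i % len(key) index is guarded with getD 'A', reached
-- only when key = "" and msg ≠ "" where Python raises ZeroDivisionError (outside Pre_).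
def pvChiffre (msg key : String) : String :=
  let ms := msg.toList
  let ks := key.toList
  String.ofList ((List.range ms.length).map (fun i =>
    Char.ofNat ((PySem.Int.mod (((ms.getD i 'A').toNat : Int) - 65 + (((ks.getD (i % ks.length) 'A').toNat : Int) - 65)) 26 + 65).toNat)))

-- dechiffre_vigenere(cipher, key)
def pvDechiffre (cipher key : String) : String :=
  let inv_key := String.ofList (key.toList.map (fun c => Char.ofNat ((26 - ((c.toNat : Int) - 65) + 65).toNat)))
  pvChiffre cipher inv_key

-- A's recursion: goA = get_prob_deciphers's body after the `deciphers` guard;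
-- goAChars is the `for c in first:` loop making the recursive calls.
-- the `for c in first:` loop of A; `f` is the recursive call on the key tail
def goAChars (f : String → PySem.Dict String String → PySem.Dict String String) : List Char → String → PySem.Dict String String → PySem.Dict String String
  | [], _, d => d
  | c :: cs, p, d => goAChars f cs p (f (p.push c) d)

def goA (cipher : String) : List String → String → PySem.Dict String String → PySem.Dict String String
  | [], p, d => d.insert p (pvDechiffre cipher p)
  | first :: rest, p, d => goAChars (goA cipher rest) first.toList p d

def get_prob_deciphers (cipher : String) (key : List String) (prefix_ : String) (deciphers : Option (List (String × String))) : List (String × String) :=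
  (goA cipher key prefix_ (PySem.Dict.mk (deciphers.getD []))).items

-- ===== PORT B =====
def get_prob_deciphers_alt (cipher : String) (key : List String) (prefix_ : String) (deciphers : Option (List (String × String))) : List (String × String) :=
  let d : PySem.Dict String String := PySem.Dict.mk (deciphers.getD [])
  let full_keys := key.foldl (fun fks position => fks.flatMap (fun fk => position.toList.map (fun c => fk.push c))) [prefix_]
  (full_keys.foldl (fun d fk => d.insert fk (pvDechiffre cipher fk)) d).items

-- ===== PRECONDITION & SPEC =====
-- Pre_ excludes (1) key = [] with prefix "" and a non-empty cipher, where A raises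
-- ZeroDivisionError, and (2) a passed-in `deciphers` association list with duplicate
-- keys, which has no Python-dict counterpart (the dict collapses duplicates).
def Pre_get_prob_deciphers (cipher : String) (key : List String) (prefix_ : String) (deciphers : Option (List (String × String))) : Prop :=
  (¬ (key = [] ∧ prefix_ = "" ∧ cipher ≠ "")) ∧ ((deciphers.getD []).map Prod.fst).Nodup
instance (cipher : String) (key : List String) (prefix_ : String) (deciphers : Option (List (String × String))) : Decidable (Pre_get_prob_deciphers cipher key prefix_ deciphers) := by unfold Pre_get_prob_deciphers; infer_instance

def pvWitness_get_prob_deciphers : String × List String × String × (Option (List (String × String))) := ("AB", ["AB", "C"], "", none)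

def Spec_get_prob_deciphers (cipher : String) (key : List String) (prefix_ : String) (deciphers : Option (List (String × String))) (out : List (String × String)) : Prop := out = get_prob_deciphers_alt cipher key prefix_ deciphers
instance (cipher : String) (key : List String) (prefix_ : String) (deciphers : Option (List (String × String))) (out : List (String × String)) : Decidable (Spec_get_prob_deciphers cipher key prefix_ deciphers out) := by unfold Spec_get_prob_deciphers; infer_instance

-- ===== CLAIM (what is proved, stated in full; the proofs are below) =====
def Claim_equal_get_prob_deciphers : Prop := ∀ (cipher : String) (key : List String) (prefix_ : String) (deciphers : Option (List (String × String))), Dom_get_prob_deciphers cipher key prefix_ deciphers → Pre_get_prob_deciphers cipher key prefix_ deciphers → Spec_get_prob_deciphers cipher key prefix_ deciphers (get_prob_deciphers cipher key prefix_ deciphers)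

-- ===== LEMMAS AND PROOFS =====

-- The list of full keys A's DFS visits, in visiting order.
def fullsR : List String → String → List String
  | [], p => [p]
  | first :: rest, p => first.toList.flatMap (fun c => fullsR rest (p.push c))

lemma foldl_step_eq_flatMap_fullsR (key : List String) (fs : List String) :
    key.foldl (fun fks position => fks.flatMap (fun fk => position.toList.map (fun c => fk.push c))) fs
      = fs.flatMap (fun f => fullsR key f) := by
  induction key generalizing fs with
  | nil => simp [fullsR]
  | cons first rest ih =>
      simp only [List.foldl_cons, ih, fullsR, List.flatMap_assoc]
      congr 1
      funext f
      simp [List.flatMap_map]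

lemma goA_eq_foldl (cipher : String) :
    ∀ (key : List String) (p : String) (d : PySem.Dict String String),
      goA cipher key p d
        = (fullsR key p).foldl (fun d fk => d.insert fk (pvDechiffre cipher fk)) d := by
  intro key
  induction key with
  | nil => intro p d; simp [goA, fullsR]
  | cons first rest ih =>
      intro p d
      rw [goA, fullsR]
      induction first.toList generalizing p d with
      | nil => simp [goAChars]
      | cons c cs ihc =>
          rw [goAChars, ihc, ih]
          simp [List.foldl_append]

-- ===== VERDICT (by name: the statement is the Claim_ definition above) =====
theorem get_prob_deciphers_spec : Claim_equal_get_prob_deciphers := by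
  intro cipher key prefix_ deciphers _ _
  unfold Spec_get_prob_deciphers get_prob_deciphers get_prob_deciphers_alt
  rw [goA_eq_foldl, foldl_step_eq_flatMap_fullsR]
  simp
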